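-- pv_equiv track=rewrite | github.com/krithikasadhamuna/clean | log_forwarding/server/api/dynamic_frontend_api.py | _determine_zone_type_from_agents
-- ===== SOURCE A (Python) =====
-- from typing import Dict, Any, List, Optional, Tuple
--
-- def _determine_zone_type_from_agents(agents: List[Dict]) -> str:
--     """Determine zone type based on agents in the zone"""
--     if not agents:
--         return 'unknown'
--
--     # Determine type based on agent types in the zone
--     agent_types = [agent.get('type', 'unknown') for agent in agents]
--
--     if 'attack' in agent_types:
--         return 'gateway'  # Attack agents typically in external/gateway zones
--     elif 'detection' in agent_types:
--         return 'server'   # Detection agents in server infrastructure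
--     elif 'deploy' in agent_types:
--         return 'firewall' # Deploy agents in security fabric
--     elif 'intelligence' in agent_types:
--         return 'database' # Intelligence agents near data
--     elif 'endpoint' in agent_types:
--         return 'workstation' # Endpoint agents are workstations
--     else:
--         return 'server'   # Default to server
-- ===== SOURCE B (Python) =====
-- from typing import Dict, Any, List, Optional, Tuple
--
-- _RANK = {'attack': 0, 'detection': 1, 'deploy': 2, 'intelligence': 3, 'endpoint': 4}
-- _ZONES = ('gateway', 'server', 'firewall', 'database', 'workstation', 'server')
--
-- def _determine_zone_type_from_agents(agents: List[Dict]) -> str: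
--     """Determine zone type based on agents in the zone"""
--     if not agents:
--         return 'unknown'
--     # Single pass: track the minimum priority rank seen; 5 = no priority type.
--     best = 5
--     for agent in agents:
--         rank = _RANK.get(agent.get('type', 'unknown'), 5)
--         if rank < best:
--             best = rank
--             if best == 0:
--                 break  # highest priority found, nothing can beat it
--     return _ZONES[best]
-- ===== Notes on version B (the rewrite author's own statement) =====
-- stated objective: alternative
-- what changed: Replaces the build-all-types-then-five-membership-scans if/elif chain with a single-pass minimum-rank reduction over the agents (each agent type mapped to a numeric priority, keeping the running minimum with an early exit at rank 0) followed by one table lookup of the zone name.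
import Mathlib
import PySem

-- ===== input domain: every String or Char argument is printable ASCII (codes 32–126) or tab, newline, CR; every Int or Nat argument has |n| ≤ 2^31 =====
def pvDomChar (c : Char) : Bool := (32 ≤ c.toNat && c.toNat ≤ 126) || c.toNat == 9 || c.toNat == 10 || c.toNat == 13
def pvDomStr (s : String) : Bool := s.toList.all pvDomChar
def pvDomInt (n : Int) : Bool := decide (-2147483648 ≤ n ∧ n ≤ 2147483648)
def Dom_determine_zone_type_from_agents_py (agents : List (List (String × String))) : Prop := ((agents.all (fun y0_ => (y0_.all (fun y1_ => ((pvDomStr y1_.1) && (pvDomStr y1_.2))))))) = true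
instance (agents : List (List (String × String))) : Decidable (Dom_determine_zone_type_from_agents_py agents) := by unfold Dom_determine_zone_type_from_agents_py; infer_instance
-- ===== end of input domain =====

-- B replaces A's build-all-types + five membership scans by a single-pass minimum-priority-rank
-- reduction with a final table lookup (objective: alternative algorithm, same result).

-- ===== PORT A =====
-- A: empty guard, list of agent.get('type','unknown'), then an if/elif membership chain.
def determine_zone_type_from_agents_py (agents : List (List (String × String))) : String :=
  if agents.isEmpty then "unknown"
  else
    let agent_types := agents.map (fun a => (PySem.Dict.mk a).getD "type" "unknown")
    if agent_types.contains "attack" then "gateway"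
    else if agent_types.contains "detection" then "server"
    else if agent_types.contains "deploy" then "firewall"
    else if agent_types.contains "intelligence" then "database"
    else if agent_types.contains "endpoint" then "workstation"
    else "server"

-- ===== PORT B =====
-- B: _RANK.get(agent.get('type','unknown'), 5) per agent, running minimum with break at 0,
-- then _ZONES[best].
def pvRankDict : PySem.Dict String Int :=
  PySem.Dict.mk [("attack", 0), ("detection", 1), ("deploy", 2), ("intelligence", 3), ("endpoint", 4)]

-- the loop: running-minimum with early break when best hits 0
def pvBestRank : List (List (String × String)) → Int → Int
  | [], best => best
  | agent :: rest, best =>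
      let rank := pvRankDict.getD ((PySem.Dict.mk agent).getD "type" "unknown") 5
      if rank < best then
        if rank == 0 then rank   -- break
        else pvBestRank rest rank
      else pvBestRank rest best

-- _ZONES[best]; exact on 0 ≤ best ≤ 5, the only values the loop can produce
def pvZoneOf (best : Int) : String :=
  if best = 0 then "gateway"
  else if best = 1 then "server"
  else if best = 2 then "firewall"
  else if best = 3 then "database"
  else if best = 4 then "workstation"
  else "server"

def determine_zone_type_from_agents_py_alt (agents : List (List (String × String))) : String :=
  if agents.isEmpty then "unknown"
  else pvZoneOf (pvBestRank agents 5)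

-- ===== PRECONDITION & SPEC =====
def Spec_determine_zone_type_from_agents_py (agents : List (List (String × String))) (out : String) : Prop := out = determine_zone_type_from_agents_py_alt agents
instance (agents : List (List (String × String))) (out : String) : Decidable (Spec_determine_zone_type_from_agents_py agents out) := by unfold Spec_determine_zone_type_from_agents_py; infer_instance

-- ===== CLAIM (what is proved, stated in full; the proofs are below) =====
def Claim_equal_determine_zone_type_from_agents_py : Prop := ∀ (agents : List (List (String × String))), Dom_determine_zone_type_from_agents_py agents → Spec_determine_zone_type_from_agents_py agents (determine_zone_type_from_agents_py agents)

-- ===== LEMMAS AND PROOFS =====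

-- the rank of a single type string, written as an if-chain
def pvRankT (t : String) : Int :=
  if t = "attack" then 0
  else if t = "detection" then 1
  else if t = "deploy" then 2
  else if t = "intelligence" then 3
  else if t = "endpoint" then 4
  else 5

-- the minimum rank over a list of type strings (5 if none present)
def pvMinRank (ts : List String) : Int := (ts.map pvRankT).foldr min 5

theorem pvRankDict_getD (t : String) : pvRankDict.getD t 5 = pvRankT t := by
  unfold pvRankT
  by_cases h0 : t = "attack"
  · subst h0; decide
  rw [if_neg h0]
  by_cases h1 : t = "detection"
  · subst h1; decide
  rw [if_neg h1]
  by_cases h2 : t = "deploy"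
  · subst h2; decide
  rw [if_neg h2]
  by_cases h3 : t = "intelligence"
  · subst h3; decide
  rw [if_neg h3]
  by_cases h4 : t = "endpoint"
  · subst h4; decide
  rw [if_neg h4]
  simp [pvRankDict, PySem.Dict.getD_eq_get?_getD, PySem.Dict.get?,
    Ne.symm h0, Ne.symm h1, Ne.symm h2, Ne.symm h3, Ne.symm h4]

theorem pvRankT_bounds (t : String) : 0 ≤ pvRankT t ∧ pvRankT t ≤ 5 := by
  unfold pvRankT; split_ifs <;> omega

theorem pvMinRank_bounds (ts : List String) : 0 ≤ pvMinRank ts ∧ pvMinRank ts ≤ 5 := by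
  induction ts with
  | nil => simp [pvMinRank]
  | cons t ts ih =>
      have ht := pvRankT_bounds t
      simp only [pvMinRank, List.map, List.foldr] at ih ⊢
      omega

-- loop invariant: pvBestRank computes min best (minimum rank of the types), for 0 ≤ best ≤ 5
theorem pvBestRank_eq (agents : List (List (String × String))) :
    ∀ best : Int, 0 ≤ best → best ≤ 5 →
      pvBestRank agents best = min best (pvMinRank (agents.map (fun a => (PySem.Dict.mk a).getD "type" "unknown"))) := by
  induction agents with
  | nil =>
      intro best hb hb5
      simp only [pvBestRank, pvMinRank, List.map_nil, List.foldr_nil]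
      omega
  | cons a rest ih =>
      intro best hb hb5
      set t := (PySem.Dict.mk a).getD "type" "unknown" with ht
      have hr := pvRankT_bounds t
      have hrest := pvMinRank_bounds (rest.map (fun a => (PySem.Dict.mk a).getD "type" "unknown"))
      simp only [pvMinRank] at hrest
      simp only [pvBestRank, pvRankDict_getD, ← ht, List.map, pvMinRank, List.foldr]
      split_ifs with h1 h2
      · simp only [beq_iff_eq] at h2
        have := ih (pvRankT t) (by omega) (by omega)
        simp only [pvMinRank] at this
        omega
      · have := ih (pvRankT t) (by omega) (by omega)
        simp only [pvMinRank] at this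
        rw [this]; omega
      · have := ih best hb hb5
        simp only [pvMinRank] at this
        rw [this]; omega

theorem pvMinRank_le_iff (ts : List String) (k : Int) (hk : k < 5) :
    pvMinRank ts ≤ k ↔ ∃ t ∈ ts, pvRankT t ≤ k := by
  induction ts with
  | nil => simp [pvMinRank]; omega
  | cons t ts ih =>
      simp only [pvMinRank, List.map_cons, List.foldr_cons] at ih ⊢
      rw [min_le_iff, ih]
      simp [List.mem_cons, or_and_right, exists_or]

theorem pvRankT_le_zero (t : String) : pvRankT t ≤ 0 ↔ t = "attack" := by
  unfold pvRankT; split_ifs <;> simp_all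

theorem pvRankT_le_one (t : String) : pvRankT t ≤ 1 ↔ (t = "attack" ∨ t = "detection") := by
  unfold pvRankT; split_ifs <;> simp_all

theorem pvRankT_le_two (t : String) : pvRankT t ≤ 2 ↔ (t = "attack" ∨ t = "detection" ∨ t = "deploy") := by
  unfold pvRankT; split_ifs <;> simp_all

theorem pvRankT_le_three (t : String) :
    pvRankT t ≤ 3 ↔ (t = "attack" ∨ t = "detection" ∨ t = "deploy" ∨ t = "intelligence") := by
  unfold pvRankT; split_ifs <;> simp_all

theorem pvRankT_le_four (t : String) :
    pvRankT t ≤ 4 ↔ (t = "attack" ∨ t = "detection" ∨ t = "deploy" ∨ t = "intelligence" ∨ t = "endpoint") := by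
  unfold pvRankT; split_ifs <;> simp_all

-- A's if/elif chain equals the zone of the minimum rank
theorem chain_eq_zone (ts : List String) :
    (if ts.contains "attack" then "gateway"
     else if ts.contains "detection" then "server"
     else if ts.contains "deploy" then "firewall"
     else if ts.contains "intelligence" then "database"
     else if ts.contains "endpoint" then "workstation"
     else "server") = pvZoneOf (pvMinRank ts) := by
  have hb := pvMinRank_bounds ts
  have c0 : pvMinRank ts ≤ 0 ↔ "attack" ∈ ts := by
    rw [pvMinRank_le_iff ts 0 (by omega)]; simp [pvRankT_le_zero]
  have c1 : pvMinRank ts ≤ 1 ↔ ("attack" ∈ ts ∨ "detection" ∈ ts) := by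
    rw [pvMinRank_le_iff ts 1 (by omega)]
    simp [pvRankT_le_one, and_or_left, exists_or]
  have c2 : pvMinRank ts ≤ 2 ↔ ("attack" ∈ ts ∨ "detection" ∈ ts ∨ "deploy" ∈ ts) := by
    rw [pvMinRank_le_iff ts 2 (by omega)]
    simp [pvRankT_le_two, and_or_left, exists_or]
  have c3 : pvMinRank ts ≤ 3 ↔ ("attack" ∈ ts ∨ "detection" ∈ ts ∨ "deploy" ∈ ts ∨ "intelligence" ∈ ts) := by
    rw [pvMinRank_le_iff ts 3 (by omega)]
    simp [pvRankT_le_three, and_or_left, exists_or]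
  have c4 : pvMinRank ts ≤ 4 ↔ ("attack" ∈ ts ∨ "detection" ∈ ts ∨ "deploy" ∈ ts ∨ "intelligence" ∈ ts ∨ "endpoint" ∈ ts) := by
    rw [pvMinRank_le_iff ts 4 (by omega)]
    simp [pvRankT_le_four, and_or_left, exists_or]
  have hm : pvMinRank ts = 0 ∨ pvMinRank ts = 1 ∨ pvMinRank ts = 2 ∨ pvMinRank ts = 3 ∨
      pvMinRank ts = 4 ∨ pvMinRank ts = 5 := by omega
  rcases hm with h | h | h | h | h | h <;> rw [h] <;>
    simp only [List.contains_eq_mem, pvZoneOf, decide_eq_true_eq] <;> rw [h] at c0 c1 c2 c3 c4 <;>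
    simp_all

theorem determine_zone_type_from_agents_py_spec : Claim_equal_determine_zone_type_from_agents_py := by
  intro agents _
  unfold Spec_determine_zone_type_from_agents_py
  unfold determine_zone_type_from_agents_py determine_zone_type_from_agents_py_alt
  by_cases h : agents.isEmpty
  · simp [h]
  · simp only [h, Bool.false_eq_true, if_false]
    rw [pvBestRank_eq agents 5 (by omega) (by omega), chain_eq_zone]
    have := pvMinRank_bounds (agents.map (fun a => (PySem.Dict.mk a).getD "type" "unknown"))
    congr 1
    omega
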